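-- pv_equiv track=rewrite | github.com/miliar/Code_Jam_Webscraper | Solutions_python/Problem_178/4189.py | solve
-- ===== SOURCE A (Python) =====
-- def solve(t):
--     current = t[0]
--     flips = 0
--     for i in t:
--         if i != current:
--             current = i
--             flips = flips + 1
--     if current == '-':
--         return flips + 1
--     return flips
-- ===== SOURCE B (Python) =====
-- def _nruns(t):
--     # count maximal runs of equal characters by repeatedly stripping the leading run
--     runs = 0
--     while t:
--         t = t.lstrip(t[0])
--         runs += 1
--     return runs
--
--
-- def solve(t):
--     runs = _nruns(t)
--     # flips = runs - 1; t[-1] raises IndexError on empty t, like A's t[0]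
--     return runs - 1 + (1 if t[-1] == '-' else 0)
-- ===== Notes on version B (the rewrite author's own statement) =====
-- stated objective: alternative
-- what changed: Replaces A's per-character loop maintaining (current, flips) state with repeated whole-run stripping via str.lstrip that counts maximal runs, then returns runs minus one plus a direct last-character adjustment.
import Mathlib
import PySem

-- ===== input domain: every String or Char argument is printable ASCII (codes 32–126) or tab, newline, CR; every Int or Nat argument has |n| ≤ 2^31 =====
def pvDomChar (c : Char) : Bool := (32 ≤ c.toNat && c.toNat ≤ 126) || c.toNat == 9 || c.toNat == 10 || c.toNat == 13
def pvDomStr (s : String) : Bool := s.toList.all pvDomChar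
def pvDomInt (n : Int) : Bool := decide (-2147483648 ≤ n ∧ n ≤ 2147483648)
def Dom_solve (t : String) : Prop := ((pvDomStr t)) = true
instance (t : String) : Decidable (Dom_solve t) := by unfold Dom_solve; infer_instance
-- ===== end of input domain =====

-- B replaces A's per-character (current, flips) loop by repeatedly stripping the leading run
-- of equal characters (Python str.lstrip) and counting the runs; answer = runs - 1 plus the last-character adjustment.
-- Objective: alternative decomposition, same return value.

-- ===== PORT A =====
-- A: current = t[0]; one fold over t updating (current, flips); final '-' adjustment.
def solve (t : String) : Int :=
  match PySem.Str.pyGet? t 0 with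
  | none => 0   -- A raises IndexError here (empty t); excluded by Pre_solve
  | some c0 =>
    let s := t.toList.foldl
      (fun (s : Char × Int) i => if i ≠ s.1 then (i, s.2 + 1) else s) (c0, 0)
    if s.1 = '-' then s.2 + 1 else s.2

-- ===== PORT B =====
-- Source B's while loop: strip the leading run (t.lstrip(t[0]) with a single-char argument is
-- exactly 'drop leading chars equal to t[0]' — ported by hand as dropWhile; exact), count runs.
def nruns : List Char → Int
  | [] => 0
  | c :: l => 1 + nruns (l.dropWhile (· == c))
termination_by l => l.length
decreasing_by simpa using Nat.lt_succ_of_le (List.length_dropWhile_le _ _)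

def solve_alt (t : String) : Int :=
  let runs := nruns t.toList
  match PySem.Str.pyGet? t (-1) with
  | none => 0   -- Source B raises IndexError here (empty t); excluded by Pre_solve
  | some last => runs - 1 + (if last = '-' then 1 else 0)

-- ===== PRECONDITION & SPEC =====
-- Pre_ excludes the empty string, on which A's t[0] raises IndexError (B's t[-1] raises there too).
def Pre_solve (t : String) : Prop := t ≠ ""
instance (t : String) : Decidable (Pre_solve t) := by unfold Pre_solve; infer_instance
def pvWitness_solve : String := "+-+"

def Spec_solve (t : String) (out : Int) : Prop := out = solve_alt t
instance (t : String) (out : Int) : Decidable (Spec_solve t out) := by unfold Spec_solve; infer_instance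

-- ===== CLAIM (what is proved, stated in full; the proofs are below) =====
def Claim_equal_solve : Prop := ∀ (t : String), Dom_solve t → Pre_solve t → Spec_solve t (solve t)

-- ===== LEMMAS AND PROOFS =====

-- number of adjacent flips along cur :: l
def diffCount : Char → List Char → Int
  | _, [] => 0
  | cur, x :: xs => (if x ≠ cur then 1 else 0) + diffCount x xs

-- last element of cur :: l
def lastD : Char → List Char → Char
  | d, [] => d
  | _, x :: xs => lastD x xs

theorem getLast?_eq_lastD (l : List Char) (c : Char) :
    (c :: l).getLast? = some (lastD c l) := by
  induction l generalizing c with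
  | nil => rfl
  | cons y ys ih => rw [List.getLast?_cons_cons, ih]; rfl

theorem a_fold (l : List Char) (cur : Char) (f : Int) :
    l.foldl (fun (s : Char × Int) i => if i ≠ s.1 then (i, s.2 + 1) else s) (cur, f)
      = (lastD cur l, f + diffCount cur l) := by
  induction l generalizing cur f with
  | nil => simp [lastD, diffCount]
  | cons x xs ih =>
    rw [List.foldl_cons]
    by_cases hx : x = cur
    · subst hx
      rw [if_neg (by simp), ih]
      simp [lastD, diffCount]
    · rw [if_pos hx, ih]
      refine Prod.ext rfl ?_
      simp [diffCount, hx]; ring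

theorem nruns_cons (l : List Char) (c : Char) :
    nruns (c :: l) = 1 + diffCount c l := by
  induction l generalizing c with
  | nil => simp [nruns, diffCount]
  | cons x xs ih =>
    by_cases hx : x = c
    · subst hx
      have : nruns (x :: x :: xs) = nruns (x :: xs) := by
        rw [nruns, nruns]
        simp [List.dropWhile]
      rw [this, ih]
      simp [diffCount]
    · have hdrop : (x :: xs).dropWhile (· == c) = x :: xs := by
        exact List.dropWhile_cons_of_neg (by simp [hx])
      rw [nruns, hdrop, ih]
      simp [diffCount, hx]

-- ===== VERDICT (by name: the statement is the Claim_ definition above) =====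
theorem solve_spec : Claim_equal_solve := by
  intro t _ hpre
  unfold Spec_solve solve solve_alt
  obtain ⟨c, rest, hl⟩ : ∃ c rest, t.toList = c :: rest := by
    cases h : t.toList with
    | nil => exact absurd (by simpa using congrArg String.ofList h) hpre
    | cons c rest => exact ⟨c, rest, rfl⟩
  have h0 : PySem.Str.pyGet? t 0 = some c := by
    simp [PySem.Str.pyGet?, hl]
  have hneg : PySem.Str.pyGet? t (-1) = some (lastD c rest) := by
    simp [PySem.Str.pyGet?, hl, PySem.List.pyGet?_neg_one, getLast?_eq_lastD]
  rw [h0, hneg, hl]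
  simp only [nruns_cons, a_fold]
  by_cases h : lastD c rest = '-' <;> simp [h, diffCount] <;>
    simpa [lastD] using h
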